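-- pv_equiv track=rewrite | github.com/jeanleopoldo/str8ts_solver | init.py | getRowElements
-- ===== SOURCE A (Python) =====
-- def getRowElements(grid, row, col, elements):
--     if col == -1:
--         return elements
--     element = grid[row][col]
--     elements.append(element)
--
--     if grid[row][col-1] == -1:
--         return elements
--     return getRowElements(grid, row, (col-1), elements)
-- ===== SOURCE B (Python) =====
-- def getRowElements(grid, row, col, elements):
--     if col == -1:
--         return elements
--     r = grid[row]
--     stop = 0
--     k = col - 1
--     while k >= 0:
--         if r[k] == -1:
--             stop = k + 1
--             break
--         k -= 1
--     elements.extend(reversed(r[stop:col + 1]))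
--     return elements
-- ===== Notes on version B (the rewrite author's own statement) =====
-- stated objective: alternative
-- what changed: Replaces the element-by-element recursion with a single leftward scan that locates the nearest -1 barrier, then extends the list with one reversed slice r[stop:col+1].
-- outside the precondition, e.g. on getRowElements([[-1, 5, 7]], 0, -2, []): A returns [5], B returns [5, -1]
import Mathlib
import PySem

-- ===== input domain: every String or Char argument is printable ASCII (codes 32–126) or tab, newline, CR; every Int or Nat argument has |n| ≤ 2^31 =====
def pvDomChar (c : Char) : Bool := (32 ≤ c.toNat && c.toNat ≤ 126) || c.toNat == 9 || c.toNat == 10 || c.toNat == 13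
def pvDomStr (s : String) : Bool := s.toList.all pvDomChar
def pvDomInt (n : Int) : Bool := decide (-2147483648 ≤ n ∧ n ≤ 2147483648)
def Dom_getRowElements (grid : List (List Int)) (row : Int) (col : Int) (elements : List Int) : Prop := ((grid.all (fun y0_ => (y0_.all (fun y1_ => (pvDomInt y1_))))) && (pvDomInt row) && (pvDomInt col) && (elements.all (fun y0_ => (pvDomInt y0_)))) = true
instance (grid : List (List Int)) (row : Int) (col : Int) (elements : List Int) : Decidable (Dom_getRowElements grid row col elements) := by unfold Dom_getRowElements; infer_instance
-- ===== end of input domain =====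

-- B replaces A's element-by-element recursion by one leftward scan for the nearest -1
-- barrier followed by a single reversed-slice extend; both mutate `elements` in place in
-- Python (equivalence proved about the return value, the mutation is identical).


-- ===== PORT A =====
def getRowElements (grid : List (List Int)) (row : Int) (col : Int) (elements : List Int) : List Int :=
  if col = -1 then elements
  else
    let r := (PySem.List.pyGet? grid row).getD []      -- grid[row]; Python raises IndexError on an invalid row (excluded by Pre_)
    let element := PySem.List.pyGetD r col 0           -- grid[row][col]; in range under Pre_
    let elements := elements ++ [element]
    if PySem.List.pyGetD r (col - 1) 0 = -1 then elements   -- grid[row][col-1]; in range under Pre_ (col=0 reads r[-1])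
    else if col < 0 then elements                      -- totality guard only; unreachable under Pre_
    else getRowElements grid row (col - 1) elements
termination_by (col + 1).toNat
decreasing_by omega

-- ===== PORT B =====
-- the `while k >= 0` scan of Source B: first -1 strictly left of col gives stop = k+1, else 0
-- (r[k] ported as pyGetD with default 0: k < len r throughout under Pre_)
def findStop (r : List Int) (k : Int) : Int :=
  if 0 ≤ k then
    if PySem.List.pyGetD r k 0 = -1 then k + 1
    else findStop r (k - 1)
  else 0
termination_by (k + 1).toNat
decreasing_by omega

def getRowElements_alt (grid : List (List Int)) (row : Int) (col : Int) (elements : List Int) : List Int :=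
  if col = -1 then elements
  else
    let r := (PySem.List.pyGet? grid row).getD []      -- grid[row]; Python raises IndexError on an invalid row (excluded by Pre_)
    elements ++ (PySem.List.slice r (some (findStop r (col - 1))) (some (col + 1))).reverse

-- ===== PRECONDITION & SPEC =====
-- Pre_ excludes (a) invalid row index / col ≥ row length, where A raises IndexError, and
-- (b) col < -1, Python's negative-index wraparound scan whose termination is data-dependent
-- (A mostly raises IndexError there; where a -1 stops it in time A returns, a wraparound
-- accident neither program should be specified by).
def Pre_getRowElements (grid : List (List Int)) (row : Int) (col : Int) (elements : List Int) : Prop :=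
  col = -1 ∨ (0 ≤ col ∧ col < (((PySem.List.pyGet? grid row).getD []).length : Int))
instance (grid : List (List Int)) (row : Int) (col : Int) (elements : List Int) : Decidable (Pre_getRowElements grid row col elements) := by unfold Pre_getRowElements; infer_instance

def pvWitness_getRowElements : List (List Int) × Int × Int × List Int := ([[5, -1, 7]], 0, 2, [9])

def Spec_getRowElements (grid : List (List Int)) (row : Int) (col : Int) (elements : List Int) (out : List Int) : Prop := out = getRowElements_alt grid row col elements
instance (grid : List (List Int)) (row : Int) (col : Int) (elements : List Int) (out : List Int) : Decidable (Spec_getRowElements grid row col elements out) := by unfold Spec_getRowElements; infer_instance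

-- ===== CLAIM (what is proved, stated in full; the proofs are below) =====
def Claim_equal_getRowElements : Prop := ∀ (grid : List (List Int)) (row : Int) (col : Int) (elements : List Int), Dom_getRowElements grid row col elements → Pre_getRowElements grid row col elements → Spec_getRowElements grid row col elements (getRowElements grid row col elements)

-- ===== LEMMAS AND PROOFS =====

lemma findStop_neg (r : List Int) (k : Int) (h : k < 0) : findStop r k = 0 := by
  rw [findStop]; simp [not_le.mpr h]

lemma findStop_bounds (r : List Int) (n : Nat) :
    0 ≤ findStop r ((n : Int) - 1) ∧ findStop r ((n : Int) - 1) ≤ n := by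
  induction n with
  | zero => rw [findStop_neg r _ (by omega)]; omega
  | succ m ih =>
    have : ((m + 1 : Nat) : Int) - 1 = (m : Int) := by push_cast; ring
    rw [this, findStop]
    split_ifs with h1 h2
    · omega
    · omega
    · omega

lemma findStop_succ (r : List Int) (n : Nat) :
    findStop r (n : Int) =
      if PySem.List.pyGetD r (n : Int) 0 = -1 then (n : Int) + 1 else findStop r ((n : Int) - 1) := by
  rw [findStop]; simp

lemma getRowElements_eq_slice (grid : List (List Int)) (row : Int) (r : List Int)
    (hr : PySem.List.pyGet? grid row = some r) :
    ∀ (n : Nat) (elements : List Int), n < r.length →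
      getRowElements grid row (n : Int) elements =
        elements ++ (PySem.List.slice r (some (findStop r ((n : Int) - 1))) (some ((n : Int) + 1))).reverse := by
  intro n
  induction n with
  | zero =>
    intro elements hlen
    obtain ⟨a, t, rfl⟩ : ∃ a t, r = a :: t := by
      cases r with
      | nil => simp at hlen
      | cons a t => exact ⟨a, t, rfl⟩
    rw [getRowElements]
    simp only [Nat.cast_zero, hr, Option.getD_some]
    rw [if_neg (by omega), findStop_neg _ _ (by omega)]
    have hslice : PySem.List.slice (a :: t) (some (0 : Int)) (some ((0 : Int) + 1)) = [a] := by
      rw [show ((0 : Int) + 1) = ((1 : Nat) : Int) by norm_num,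
        show (0 : Int) = ((0 : Nat) : Int) from rfl, PySem.List.slice_natCast]
      simp
    rw [hslice]
    have hget0 : PySem.List.pyGetD (a :: t) (0 : Int) 0 = a := PySem.List.pyGetD_zero_cons a t 0
    rw [hget0]
    have hgetm1 : PySem.List.pyGetD (a :: t) ((0 : Int) - 1) 0 = (a :: t).getLast (List.cons_ne_nil a t) := by
      have : ((0 : Int) - 1) = (-1 : Int) := by norm_num
      rw [this]; exact PySem.List.pyGetD_neg_one _ _ (List.cons_ne_nil a t)
    rw [hgetm1]
    split_ifs with h1 h2
    · simp
    · omega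
    · rw [getRowElements]
      rw [if_pos (by omega)]
      simp
  | succ m ih =>
    intro elements hlen
    have hc1 : ((m + 1 : Nat) : Int) - 1 = (m : Int) := by push_cast; ring
    rw [getRowElements]
    rw [if_neg (by push_cast; omega)]
    simp only [hr, Option.getD_some, hc1]
    have hgetc : PySem.List.pyGetD r ((m + 1 : Nat) : Int) 0 = r[m + 1] :=
      PySem.List.pyGetD_ofNat r (m + 1) 0 hlen
    have hgetm : PySem.List.pyGetD r (m : Int) 0 = r[m] :=
      PySem.List.pyGetD_ofNat r m 0 (by omega)
    rw [hgetc, hgetm, findStop_succ, hgetm]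
    split_ifs with h1 h2
    · -- barrier at m: slice is [r[m+1]]
      have hsl : PySem.List.slice r (some ((m : Int) + 1)) (some (((m + 1 : Nat) : Int) + 1)) = [r[m + 1]] := by
        have e1 : ((m : Int) + 1) = ((m + 1 : Nat) : Int) := by push_cast; ring
        have e2 : (((m + 1 : Nat) : Int) + 1) = ((m + 2 : Nat) : Int) := by push_cast; ring
        rw [e1, e2, PySem.List.slice_natCast]
        rw [show m + 2 - (m + 1) = 1 from by omega, List.take_one, List.head?_drop, List.getElem?_eq_getElem hlen]
        simp
      rw [hsl]; simp
    · omega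
    · -- no barrier at m: recurse, then peel r[m+1] off the slice
      rw [ih _ (by omega)]
      obtain ⟨hs0, hsle⟩ := findStop_bounds r m
      set s := findStop r ((m : Int) - 1) with hs
      have hsnat : s = ((s.toNat : Nat) : Int) := by omega
      have htn : s.toNat ≤ m := by omega
      have e1 : ((m : Int) + 1) = ((m + 1 : Nat) : Int) := by push_cast; ring
      have e2 : (((m + 1 : Nat) : Int) + 1) = ((m + 2 : Nat) : Int) := by push_cast; ring
      rw [hsnat, e1, e2, PySem.List.slice_natCast, PySem.List.slice_natCast]
      have hsplit : (r.drop s.toNat).take (m + 2 - s.toNat)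
          = (r.drop s.toNat).take (m + 1 - s.toNat) ++ [r[m + 1]] := by
        have h2 : m + 2 - s.toNat = (m + 1 - s.toNat) + 1 := by omega
        rw [h2, List.take_add_one, List.getElem?_drop]
        have hidx : s.toNat + (m + 1 - s.toNat) = m + 1 := by omega
        rw [hidx, List.getElem?_eq_getElem hlen]
        simp
      rw [hsplit, List.reverse_append]
      simp

-- ===== VERDICT (by name: the statement is the Claim_ definition above) =====
theorem getRowElements_spec : Claim_equal_getRowElements := by
  intro grid row col elements _ hpre
  unfold Spec_getRowElements
  rcases hpre with h | ⟨h0, hlt⟩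
  · subst h
    rw [getRowElements, getRowElements_alt]
    simp
  · cases hget : PySem.List.pyGet? grid row with
    | none => rw [hget] at hlt; simp at hlt; omega
    | some r =>
      rw [hget] at hlt
      simp only [Option.getD_some] at hlt
      have hcol : col = ((col.toNat : Nat) : Int) := by omega
      have hlen : col.toNat < r.length := by omega
      rw [hcol, getRowElements_eq_slice grid row r hget col.toNat elements hlen,
        getRowElements_alt, if_neg (by omega)]
      simp only [hget, Option.getD_some]
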